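-- pv_equiv track=rewrite | github.com/vankhoa21991/Drawing | online_recog/preprocess.py | lines2strokes5
-- ===== SOURCE A (Python) =====
-- def lines2strokes5(Lines_in):
--     # Lines in: chars # [x1, x2 ,y1, y2]
--     Chars = []
--     for c in range(len(Lines_in)):         # char c
--         Char = []
--         for s in range(len(Lines_in[c])):  # stroke s
--             for l in range(len(Lines_in[c][s])):
--
--                 dx = Lines_in[c][s][l][1] - Lines_in[c][s][l][0]
--                 dy = Lines_in[c][s][l][3] - Lines_in[c][s][l][2]
--
--                 if l == len(Lines_in[c][s]) - 1 and s == len(Lines_in[c]) - 1:   # end of char: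
--                     si = [0, 0, 1]
--                 else:
--                     si = [1, 0, 0]
--
--                 Char.append([dx, dy] + si)
--
--                 if l == len(Lines_in[c][s]) - 1 and s != len(Lines_in[c]) - 1:   # end of stroke
--                     dx = Lines_in[c][s + 1][0][0] - Lines_in[c][s][l][1]
--                     dy = Lines_in[c][s + 1][0][2] - Lines_in[c][s][l][3]
--                     si = [0, 1, 0]
--                     Char.append([dx, dy] + si)
--
--         Chars.append(Char)
--     return Chars
-- ===== SOURCE B (Python) =====
-- def lines2strokes5(Lines_in):
--     # Back-to-front decomposition: each char is built from the last stroke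
--     # backwards, prepending each stroke's segments, so the end-of-char marker
--     # is placed at emission time and connectors use the carried next stroke.
--     return [_char_segments(strokes) for strokes in Lines_in]
--
--
-- def _tail_stroke(st):
--     # the char's final stroke: every line [1,0,0] except its last, [0,0,1]
--     segs = [[ln[1] - ln[0], ln[3] - ln[2], 1, 0, 0] for ln in st[:-1]]
--     if st:
--         last = st[-1]
--         segs.append([last[1] - last[0], last[3] - last[2], 0, 0, 1])
--     return segs
--
--
-- def _char_segments(strokes):
--     if not strokes:
--         return []
--     *init, last = strokes
--     out = _tail_stroke(last)
--     nxt = last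
--     for st in reversed(init):
--         segs = [[ln[1] - ln[0], ln[3] - ln[2], 1, 0, 0] for ln in st]
--         if st:
--             la, fr = st[-1], nxt[0]
--             segs.append([fr[0] - la[1], fr[2] - la[3], 0, 1, 0])
--         out = segs + out
--         nxt = st
--     return out
-- ===== Notes on version B (the rewrite author's own statement) =====
-- stated objective: alternative
-- what changed: B builds each char back-to-front: it first renders the final stroke (placing the [0,0,1] end marker at emission time), then walks the remaining strokes in reverse, prepending each stroke's [1,0,0] segments plus a connector computed from the carried next stroke; A is a forward triple index loop deciding markers and connectors inside the innermost line loop.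
import Mathlib
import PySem

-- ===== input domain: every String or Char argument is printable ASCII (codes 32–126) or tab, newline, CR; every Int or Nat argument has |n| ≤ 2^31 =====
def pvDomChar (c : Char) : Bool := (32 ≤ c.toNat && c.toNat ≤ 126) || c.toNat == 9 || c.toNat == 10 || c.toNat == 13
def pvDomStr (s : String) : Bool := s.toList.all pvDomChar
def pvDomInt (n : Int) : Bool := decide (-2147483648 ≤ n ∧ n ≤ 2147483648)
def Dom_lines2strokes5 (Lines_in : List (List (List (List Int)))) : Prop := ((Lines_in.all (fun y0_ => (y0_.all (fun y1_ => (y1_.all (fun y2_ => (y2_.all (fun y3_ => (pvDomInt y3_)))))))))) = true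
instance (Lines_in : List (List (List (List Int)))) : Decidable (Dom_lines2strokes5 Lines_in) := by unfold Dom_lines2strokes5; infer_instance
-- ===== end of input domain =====

-- B builds each char back-to-front (final stroke first, then prepend earlier strokes with carried-next connectors) instead of A's forward triple index loop; same cost, different decomposition.


-- ===== PORT A =====
def lines2strokes5 (Lines_in : List (List (List (List Int)))) : List (List (List Int)) :=
  (PySem.List.pyRange 0 (Lines_in.length : Int) 1).foldl (fun Chars c =>
    let char := PySem.List.pyGetD Lines_in c []
    let Char := (PySem.List.pyRange 0 (char.length : Int) 1).foldl (fun Char s =>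
      let st := PySem.List.pyGetD char s []
      (PySem.List.pyRange 0 (st.length : Int) 1).foldl (fun Char l =>
        let line := PySem.List.pyGetD st l []
        let dx := PySem.List.pyGetD line 1 0 - PySem.List.pyGetD line 0 0
        let dy := PySem.List.pyGetD line 3 0 - PySem.List.pyGetD line 2 0
        let si : List Int :=
          if l = (st.length : Int) - 1 ∧ s = (char.length : Int) - 1 then [0, 0, 1] else [1, 0, 0]
        let Char := Char ++ [[dx, dy] ++ si]
        if l = (st.length : Int) - 1 ∧ s ≠ (char.length : Int) - 1 then
          let nxt := PySem.List.pyGetD (PySem.List.pyGetD char (s + 1) []) 0 []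
          let dx2 := PySem.List.pyGetD nxt 0 0 - PySem.List.pyGetD line 1 0
          let dy2 := PySem.List.pyGetD nxt 2 0 - PySem.List.pyGetD line 3 0
          Char ++ [[dx2, dy2, 0, 1, 0]]
        else Char) Char) []
    Chars ++ [Char]) []

-- ===== PORT B =====
-- line tagged as a within-stroke segment: [dx, dy, 1, 0, 0]
def tagLineB (ln : List Int) : List Int :=
  [PySem.List.pyGetD ln 1 0 - PySem.List.pyGetD ln 0 0,
   PySem.List.pyGetD ln 3 0 - PySem.List.pyGetD ln 2 0, 1, 0, 0]

-- the char's final stroke: every line [1,0,0] except its last, [0,0,1]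
def tailStrokeB (st : List (List Int)) : List (List Int) :=
  let segs := (PySem.List.slice st none (some (-1))).map tagLineB
  if st ≠ [] then
    let last := PySem.List.pyGetD st (-1) []
    segs ++ [[PySem.List.pyGetD last 1 0 - PySem.List.pyGetD last 0 0,
              PySem.List.pyGetD last 3 0 - PySem.List.pyGetD last 2 0, 0, 0, 1]]
  else segs

def charSegB (strokes : List (List (List Int))) : List (List Int) :=
  if strokes = [] then []
  else
    let init := strokes.dropLast
    let last := strokes.getLast?.getD []
    (init.reverse.foldl (fun (p : List (List Int) × List (List Int)) st =>
      let segs := st.map tagLineB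
      let segs := if st ≠ [] then
          let la := PySem.List.pyGetD st (-1) []
          let fr := PySem.List.pyGetD p.2 0 []
          segs ++ [[PySem.List.pyGetD fr 0 0 - PySem.List.pyGetD la 1 0,
                    PySem.List.pyGetD fr 2 0 - PySem.List.pyGetD la 3 0, 0, 1, 0]]
        else segs
      (segs ++ p.1, st)) (tailStrokeB last, last)).1

def lines2strokes5_alt (Lines_in : List (List (List (List Int)))) : List (List (List Int)) :=
  Lines_in.map charSegB

-- ===== PRECONDITION & SPEC =====
-- Pre_ excludes exactly the inputs where Python A raises IndexError: a line with fewer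
-- than 4 coordinates, or an empty stroke immediately following a non-empty one (the
-- connector reads the next stroke's first line).
def Pre_lines2strokes5 (Lines_in : List (List (List (List Int)))) : Prop :=
  ∀ char ∈ Lines_in,
    (∀ st ∈ char, ∀ line ∈ st, 4 ≤ line.length) ∧
    (∀ p ∈ char.zip char.tail, p.1 ≠ [] → p.2 ≠ [])
instance (Lines_in : List (List (List (List Int)))) : Decidable (Pre_lines2strokes5 Lines_in) := by
  unfold Pre_lines2strokes5; infer_instance
def pvWitness_lines2strokes5 : List (List (List (List Int))) :=
  [[[[0, 1, 0, 2], [1, 3, 2, 0]], [[3, 4, 0, 1]]]]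

def Spec_lines2strokes5 (Lines_in : List (List (List (List Int)))) (out : List (List (List Int))) : Prop := out = lines2strokes5_alt Lines_in
instance (Lines_in : List (List (List (List Int)))) (out : List (List (List Int))) : Decidable (Spec_lines2strokes5 Lines_in out) := by unfold Spec_lines2strokes5; infer_instance

-- ===== CLAIM (what is proved, stated in full; the proofs are below) =====
def Claim_equal_lines2strokes5 : Prop := ∀ (Lines_in : List (List (List (List Int)))), Dom_lines2strokes5 Lines_in → Pre_lines2strokes5 Lines_in → Spec_lines2strokes5 Lines_in (lines2strokes5 Lines_in)

-- ===== LEMMAS AND PROOFS =====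

-- closed-form building blocks (tagLineB is the within-stroke tag for both sides)
def endA (line : List Int) : List Int :=
  [PySem.List.pyGetD line 1 0 - PySem.List.pyGetD line 0 0,
   PySem.List.pyGetD line 3 0 - PySem.List.pyGetD line 2 0, 0, 0, 1]

def connA (la : List Int) (r : List (List Int)) : List Int :=
  [PySem.List.pyGetD (PySem.List.pyGetD r 0 []) 0 0 - PySem.List.pyGetD la 1 0,
   PySem.List.pyGetD (PySem.List.pyGetD r 0 []) 2 0 - PySem.List.pyGetD la 3 0, 0, 1, 0]

def markLast : List (List Int) → List (List Int)
  | [] => []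
  | [x] => [endA x]
  | x :: y :: t => tagLineB x :: markLast (y :: t)

def cmaybe (st r : List (List Int)) : List (List Int) :=
  match st.getLast? with
  | none => []
  | some la => [connA la r]

def chunksA : List (List (List Int)) → List (List Int)
  | [] => []
  | [st] => markLast st
  | st :: r :: t => st.map tagLineB ++ cmaybe st r ++ chunksA (r :: t)

-- named copies of A's loop bodies (definitionally equal to the inline lambdas)
def lBody (char : List (List (List Int))) (s : Int) (st : List (List Int))
    (Char : List (List Int)) (l : Int) : List (List Int) :=
  let line := PySem.List.pyGetD st l []
  let dx := PySem.List.pyGetD line 1 0 - PySem.List.pyGetD line 0 0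
  let dy := PySem.List.pyGetD line 3 0 - PySem.List.pyGetD line 2 0
  let si : List Int :=
    if l = (st.length : Int) - 1 ∧ s = (char.length : Int) - 1 then [0, 0, 1] else [1, 0, 0]
  let Char := Char ++ [[dx, dy] ++ si]
  if l = (st.length : Int) - 1 ∧ s ≠ (char.length : Int) - 1 then
    let nxt := PySem.List.pyGetD (PySem.List.pyGetD char (s + 1) []) 0 []
    let dx2 := PySem.List.pyGetD nxt 0 0 - PySem.List.pyGetD line 1 0
    let dy2 := PySem.List.pyGetD nxt 2 0 - PySem.List.pyGetD line 3 0
    Char ++ [[dx2, dy2, 0, 1, 0]]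
  else Char

def sBody (char : List (List (List Int))) (Char : List (List Int)) (s : Int) : List (List Int) :=
  let st := PySem.List.pyGetD char s []
  (PySem.List.pyRange 0 (st.length : Int) 1).foldl (lBody char s st) Char

def charA (char : List (List (List Int))) : List (List Int) :=
  (PySem.List.pyRange 0 (char.length : Int) 1).foldl (sBody char) []

-- named copy of B's reverse-loop body
def bBody (p : List (List Int) × List (List Int)) (st : List (List Int)) :
    List (List Int) × List (List Int) :=
  let segs := st.map tagLineB
  let segs := if st ≠ [] then
      let la := PySem.List.pyGetD st (-1) []
      let fr := PySem.List.pyGetD p.2 0 []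
      segs ++ [[PySem.List.pyGetD fr 0 0 - PySem.List.pyGetD la 1 0,
                PySem.List.pyGetD fr 2 0 - PySem.List.pyGetD la 3 0, 0, 1, 0]]
    else segs
  (segs ++ p.1, st)

theorem pvLast {α : Type} (xs : List α) (d : α) :
    PySem.List.pyGetD xs (-1) d = xs.getLast?.getD d := by
  cases xs with
  | nil => rfl
  | cons x t =>
    simp [PySem.List.pyGetD, PySem.List.pyGet?, PySem.List.pyIdx?, List.getLast?_eq_getElem?]

theorem A_map (L : List (List (List (List Int)))) : lines2strokes5 L = L.map charA := by
  calc lines2strokes5 L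
      = List.foldl (fun acc x => acc ++ [charA x]) [] L :=
        PySem.List.foldl_pyRange_zero_pyGetD' L ([] : List (List (List Int)))
          (fun acc x => acc ++ [charA x]) ([] : List (List (List Int)))
    _ = [] ++ L.map charA := PySem.List.foldl_append_singleton_eq_map charA L []
    _ = L.map charA := by simp

-- A's innermost line loop, resumed from index j (suffix ys of the stroke)
theorem lBody_loop (char : List (List (List Int))) (s : Int) (st : List (List Int)) :
    ∀ (ys : List (List Int)) (j : Nat), st.drop j = ys → ∀ (acc : List (List Int)),
      (PySem.List.pyRange (j : Int) (st.length : Int) 1).foldl (lBody char s st) acc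
      = acc ++ (if s = (char.length : Int) - 1 then markLast ys
          else ys.map tagLineB ++ cmaybe ys (PySem.List.pyGetD char (s + 1) [])) := by
  intro ys
  induction ys with
  | nil =>
    intro j h acc
    have hj : st.length ≤ j := by
      have := List.drop_eq_nil_iff.mp h
      omega
    rw [PySem.List.pyRange_one_eq_nil (by exact_mod_cast hj)]
    split_ifs <;> simp [markLast, cmaybe]
  | cons x t ih =>
    intro j h acc
    have hx : st[j]? = some x := by
      rw [← List.head?_drop, h]; rfl
    have hj : j < st.length := by
      rcases List.getElem?_eq_some_iff.mp hx with ⟨hj, _⟩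
      exact hj
    have hlen : st.length = j + t.length + 1 := by
      have := congrArg List.length h
      simp [List.length_drop] at this
      omega
    have hline : PySem.List.pyGetD st (j : Int) [] = x := by
      rw [PySem.List.pyGetD_natCast, List.getD_eq_getElem?_getD, hx]; rfl
    have hdropsucc : st.drop (j + 1) = t := by
      rw [← List.tail_drop, h]; rfl
    rw [PySem.List.pyRange_one_cons (by exact_mod_cast hj)]
    have hstep : ((j : Int) + 1) = ((j + 1 : Nat) : Int) := by push_cast; ring
    rw [List.foldl_cons, hstep, ih (j + 1) hdropsucc]
    cases t with
    | nil =>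
      have hcond : (j : Int) = (st.length : Int) - 1 := by
        simp at hlen; omega
      rw [hcond] at hline
      by_cases hs : s = (char.length : Int) - 1
      · have hb : lBody char s st acc (j : Int) = acc ++ [endA x] := by
          simp [lBody, hline, hcond, hs, endA]
        rw [hb]
        simp [markLast, hs]
      · have hb : lBody char s st acc (j : Int)
            = acc ++ [tagLineB x] ++ [connA x (PySem.List.pyGetD char (s + 1) [])] := by
          simp [lBody, hline, hcond, hs, tagLineB, connA]
        rw [hb]
        simp [hs, cmaybe, tagLineB]
    | cons y t' =>
      have hcond : ¬ ((j : Int) = (st.length : Int) - 1) := by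
        simp at hlen ⊢; omega
      have hb : lBody char s st acc (j : Int) = acc ++ [tagLineB x] := by
        simp [lBody, hline, hcond, tagLineB]
      rw [hb]
      by_cases hs : s = (char.length : Int) - 1
      · simp [markLast, hs]
      · simp [hs, cmaybe, List.getLast?_cons_cons]

-- A's stroke loop, resumed from stroke index k (suffix ys of the char)
theorem sBody_loop (char : List (List (List Int))) :
    ∀ (ys : List (List (List Int))) (k : Nat), char.drop k = ys → ∀ (acc : List (List Int)),
      (PySem.List.pyRange (k : Int) (char.length : Int) 1).foldl (sBody char) acc
      = acc ++ chunksA ys := by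
  intro ys
  induction ys with
  | nil =>
    intro k h acc
    have hk : char.length ≤ k := by
      have := List.drop_eq_nil_iff.mp h
      omega
    rw [PySem.List.pyRange_one_eq_nil (by exact_mod_cast hk)]
    simp [chunksA]
  | cons st t ih =>
    intro k h acc
    have hx : char[k]? = some st := by
      rw [← List.head?_drop, h]; rfl
    have hk : k < char.length := by
      rcases List.getElem?_eq_some_iff.mp hx with ⟨hk, _⟩
      exact hk
    have hlen : char.length = k + t.length + 1 := by
      have := congrArg List.length h
      simp [List.length_drop] at this
      omega
    have hst : PySem.List.pyGetD char (k : Int) [] = st := by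
      rw [PySem.List.pyGetD_natCast, List.getD_eq_getElem?_getD, hx]; rfl
    have hdropsucc : char.drop (k + 1) = t := by
      rw [← List.tail_drop, h]; rfl
    rw [PySem.List.pyRange_one_cons (by exact_mod_cast hk)]
    have hstep : ((k : Int) + 1) = ((k + 1 : Nat) : Int) := by push_cast; ring
    rw [List.foldl_cons, hstep, ih (k + 1) hdropsucc]
    have hsb : sBody char acc (k : Int)
        = (PySem.List.pyRange 0 (st.length : Int) 1).foldl (lBody char (k : Int) st) acc := by
      simp only [sBody, hst]
    rw [hsb]
    have h0 : (PySem.List.pyRange 0 (st.length : Int) 1).foldl (lBody char (k : Int) st) acc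
        = acc ++ (if (k : Int) = (char.length : Int) - 1 then markLast st
            else st.map tagLineB ++ cmaybe st (PySem.List.pyGetD char ((k : Int) + 1) [])) := by
      have := lBody_loop char (k : Int) st st 0 (by simp) acc
      simpa using this
    rw [h0]
    cases t with
    | nil =>
      have hcond : (k : Int) = (char.length : Int) - 1 := by
        simp at hlen; omega
      simp [chunksA, hcond]
    | cons r t' =>
      have hcond : ¬ ((k : Int) = (char.length : Int) - 1) := by
        simp at hlen ⊢; omega
      have hr : PySem.List.pyGetD char ((k : Int) + 1) [] = r := by
        have hx' : char[k + 1]? = some r := by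
          rw [← List.head?_drop, hdropsucc]; rfl
        rw [hstep, PySem.List.pyGetD_natCast, List.getD_eq_getElem?_getD, hx']; rfl
      simp only [hcond, if_false, hr, chunksA]
      simp [List.append_assoc]

theorem charA_chunks (char : List (List (List Int))) : charA char = chunksA char := by
  have := sBody_loop char char 0 (by simp) []
  simpa [charA] using this

-- B's last-stroke renderer is the closed-form markLast
theorem tailStrokeB_eq (st : List (List Int)) : tailStrokeB st = markLast st := by
  induction st with
  | nil => rfl
  | cons x t ih =>
    cases t with
    | nil =>
      simp [tailStrokeB, markLast, PySem.List.slice_to_neg_one, pvLast, endA]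
    | cons y t' =>
      have ih' := ih
      simp only [tailStrokeB, PySem.List.slice_to_neg_one, pvLast] at ih' ⊢
      simp only [List.dropLast_cons_of_ne_nil (by simp : y :: t' ≠ []), List.map_cons,
        List.getLast?_cons_cons]
      simp only [markLast]
      rw [← ih']
      simp

-- B's reverse fold over the initial strokes, prepending onto chunksA of the suffix
theorem bBody_loop :
    ∀ (init : List (List (List Int))) (r : List (List Int)) (t : List (List (List Int))),
      init.reverse.foldl bBody (chunksA (r :: t), r)
      = (chunksA (init ++ r :: t), (init ++ r :: t).headI) := by
  intro init
  induction init with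
  | nil => intro r t; simp [List.headI]
  | cons st init' ih =>
    intro r t
    rw [List.reverse_cons, List.foldl_append, ih r t, List.foldl_cons, List.foldl_nil]
    cases hi : init' ++ r :: t with
    | nil => exact absurd hi (by simp)
    | cons r' t' =>
      have hch : chunksA (st :: init' ++ r :: t)
          = st.map tagLineB ++ cmaybe st r' ++ chunksA (r' :: t') := by
        have h2 : st :: init' ++ r :: t = st :: r' :: t' := by rw [List.cons_append, hi]
        rw [h2, chunksA]
      by_cases hst : st = []
      · simp [bBody, hst, hi, List.headI]; simp [chunksA, cmaybe]
      · rcases hla' : st.getLast? with _ | la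
        · exact absurd (List.getLast?_eq_none_iff.mp hla') hst
        simp only [bBody, List.headI, if_pos hst, pvLast, hla', Option.getD_some]
        rw [hch]
        simp [cmaybe, hla', connA, List.append_assoc, List.cons_append]

theorem charAB (char : List (List (List Int))) : charA char = charSegB char := by
  rw [charA_chunks]
  cases hc : char with
  | nil => simp [charSegB, chunksA]
  | cons c0 ct =>
    have hne : c0 :: ct ≠ [] := by simp
    have hla : (c0 :: ct).getLast? = some ((c0 :: ct).getLast hne) :=
      List.getLast?_eq_some_getLast hne
    set la := (c0 :: ct).getLast hne with hladef
    have hsplit : (c0 :: ct).dropLast ++ [la] = c0 :: ct := List.dropLast_concat_getLast hne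
    have hB : charSegB (c0 :: ct)
        = ((c0 :: ct).dropLast.reverse.foldl bBody
            (tailStrokeB ((c0 :: ct).getLast?.getD []), (c0 :: ct).getLast?.getD [])).1 := rfl
    rw [hB]
    simp only [hla, Option.getD_some]
    rw [tailStrokeB_eq]
    have hmark : markLast la = chunksA [la] := rfl
    rw [hmark, bBody_loop (c0 :: ct).dropLast la [], hsplit]

-- ===== VERDICT (by name: the statement is the Claim_ definition above) =====
theorem lines2strokes5_spec : Claim_equal_lines2strokes5 := by
  intro L _ _
  unfold Spec_lines2strokes5
  rw [A_map]
  unfold lines2strokes5_alt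
  exact List.map_congr_left (fun char _ => charAB char)
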